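-- pv_equiv track=rewrite | github.com/ChibiOne/RPGenerator | rpGenerator.py | clean_user_id
-- ===== SOURCE A (Python) =====
-- def clean_user_id(user_id: str) -> str:
--     """
--     Cleans a user ID string to ensure consistent format.
--     Removes brackets, quotes, and whitespace.
--     """
--     if user_id is None:
--         return ""
--
--     # Convert to string if not already
--     user_id = str(user_id)
--
--     # Fix the escape sequence - use a set of characters instead
--     chars_to_remove = set("[]'\" ")  # Remove the escape sequence and use a set
--
--     for char in chars_to_remove:
--         user_id = user_id.replace(char, '')
--
--     return user_id
-- ===== SOURCE B (Python) =====
-- def clean_user_id(user_id: str) -> str: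
--     """
--     Cleans a user ID string to ensure consistent format.
--     Removes brackets, quotes, and whitespace in one pass over the string.
--     """
--     if user_id is None:
--         return ""
--     remove = set("[]'\" ")
--     return ''.join(c for c in str(user_id) if c not in remove)
-- ===== Notes on version B (the rewrite author's own statement) =====
-- stated objective: simpler
-- what changed: Replaces five sequential str.replace passes (one per removal character) with a single pass over the input filtering each character by set membership.
import Mathlib
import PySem

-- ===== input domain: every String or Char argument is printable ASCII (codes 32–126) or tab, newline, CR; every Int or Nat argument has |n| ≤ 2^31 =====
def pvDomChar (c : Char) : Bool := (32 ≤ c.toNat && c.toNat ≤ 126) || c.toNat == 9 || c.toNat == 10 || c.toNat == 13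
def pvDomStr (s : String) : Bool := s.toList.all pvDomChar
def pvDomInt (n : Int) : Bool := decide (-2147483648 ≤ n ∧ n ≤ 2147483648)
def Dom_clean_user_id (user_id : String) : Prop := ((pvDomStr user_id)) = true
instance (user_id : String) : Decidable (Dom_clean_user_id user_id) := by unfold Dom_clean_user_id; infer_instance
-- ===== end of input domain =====

-- B removes brackets/quotes/spaces in ONE filtering pass over the string instead of A's five
-- sequential str.replace passes (one per removal character); return values are proved equal.

-- ===== PORT A =====
-- A iterates over the removal set and calls str.replace once per character; the set's
-- iteration order is immaterial (each replace deletes an independent character), so the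
-- port fixes the order "[", "]", "'", "\"", " ".
def clean_user_id (user_id : String) : String :=
  let u1 := PySem.Str.replace user_id "[" ""
  let u2 := PySem.Str.replace u1 "]" ""
  let u3 := PySem.Str.replace u2 "'" ""
  let u4 := PySem.Str.replace u3 "\"" ""
  PySem.Str.replace u4 " " ""

-- ===== PORT B =====
def pvRemoveChars : List Char := ['[', ']', '\'', '"', ' ']

-- ''.join(c for c in user_id if c not in remove): one filtering pass over the characters.
def clean_user_id_alt (user_id : String) : String :=
  String.ofList (user_id.toList.filter (fun c => !(pvRemoveChars.contains c)))

-- ===== PRECONDITION & SPEC =====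
def Spec_clean_user_id (user_id : String) (out : String) : Prop := out = clean_user_id_alt user_id
instance (user_id : String) (out : String) : Decidable (Spec_clean_user_id user_id out) := by unfold Spec_clean_user_id; infer_instance

-- ===== CLAIM (what is proved, stated in full; the proofs are below) =====
def Claim_equal_clean_user_id : Prop := ∀ (user_id : String), Dom_clean_user_id user_id → Spec_clean_user_id user_id (clean_user_id user_id)

-- ===== LEMMAS AND PROOFS =====

-- replacing a single character by "" is exactly filtering that character out
theorem go_single (c : Char) : ∀ (fuel : Nat) (l acc : List Char), l.length ≤ fuel →
    PySem.Chars.replace.go [c] [] fuel l acc = acc.reverse ++ l.filter (fun x => !(x == c)) := by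
  intro fuel
  induction fuel with
  | zero => intro l acc h; simp at h; subst h; simp [PySem.Chars.replace.go]
  | succ n ih =>
    intro l acc h
    cases l with
    | nil => simp [PySem.Chars.replace.go]
    | cons a t =>
      rw [PySem.Chars.replace.go]
      by_cases hc : a = c
      · subst hc
        simp [List.isPrefixOf, List.filter]
        exact ih t acc (by simpa using h)
      · have hpre : ([c].isPrefixOf (a :: t)) = false := by
          simp [List.isPrefixOf]; exact fun h' => absurd h'.symm hc
        rw [hpre]
        simp only [if_neg Bool.false_ne_true, List.filter]
        have hbc : (a == c) = false := by simp [hc]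
        rw [hbc]
        rw [ih t (a :: acc) (by simpa using h)]
        simp

theorem repl_single (c : Char) (cs : List Char) :
    PySem.Chars.replace cs [c] [] = cs.filter (fun x => !(x == c)) := by
  rw [PySem.Chars.replace]
  simp
  rw [go_single c cs.length cs [] le_rfl]
  simp

theorem clean_toList (user_id : String) :
    (clean_user_id user_id).toList
      = user_id.toList.filter (fun c => !(pvRemoveChars.contains c)) := by
  show (PySem.Str.replace (PySem.Str.replace (PySem.Str.replace (PySem.Str.replace
        (PySem.Str.replace user_id "[" "") "]" "") "'" "") "\"" "") " " "").toList = _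
  simp only [PySem.Str.toList_replace]
  show PySem.Chars.replace (PySem.Chars.replace (PySem.Chars.replace (PySem.Chars.replace
        (PySem.Chars.replace user_id.toList ['['] []) [']'] []) ['\''] []) ['"'] []) [' '] [] = _
  simp only [repl_single, List.filter_filter]
  apply List.filter_congr
  intro c _
  simp only [pvRemoveChars, List.contains_cons, List.contains_nil, Bool.or_false, Bool.not_or]
  ac_rfl

-- ===== VERDICT (by name: the statement is the Claim_ definition above) =====
theorem clean_user_id_spec : Claim_equal_clean_user_id := by
  intro user_id _
  show clean_user_id user_id = clean_user_id_alt user_id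
  have h := clean_toList user_id
  unfold clean_user_id_alt
  rw [← h]
  simp
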